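-- pv_equiv track=rewrite | github.com/dongor2448/sts_to_xlsx | sts_util/load_sts_df.py | convert_seed_to_string
-- ===== SOURCE A (Python) =====
-- def convert_seed_to_string(seed: int) -> str:
--     """Converts numeric seed from run file to alphanumeric seed"""
--
--     char_string = "0123456789ABCDEFGHIJKLMNPQRSTUVWXYZ"
--     # Convert to unsigned
--     leftover = seed = seed + 2 ** 64 if seed < 0 else seed
--     char_count = len(char_string)
--     result = []
--     while leftover != 0:
--         remainder = leftover % char_count
--         leftover = leftover // char_count
--         index = int(remainder)
--         c = char_string[index]
--         result.insert(0, c)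
--     return ''.join(result)
-- ===== SOURCE B (Python) =====
-- def convert_seed_to_string(seed: int) -> str:
--     """Converts numeric seed from run file to alphanumeric seed"""
--     char_string = "0123456789ABCDEFGHIJKLMNPQRSTUVWXYZ"
--     n = seed + 2 ** 64 if seed < 0 else seed
--     if n == 0:
--         return ""
--     # find the highest power of 35 not exceeding n, then peel digits
--     # most-significant-first.
--     p = 1
--     while p * 35 <= n:
--         p *= 35
--     out = ""
--     while p > 0:
--         out += char_string[n // p]
--         n %= p
--         p //= 35
--     return out
-- ===== Notes on version B (the rewrite author's own statement) =====
-- stated objective: alternative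
-- what changed: A peels digits least-significant-first, prepending each into a list; B first finds the highest power of 35 not exceeding n, then peels digits most-significant-first by dividing by descending powers, appending to the output string.
import Mathlib
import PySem

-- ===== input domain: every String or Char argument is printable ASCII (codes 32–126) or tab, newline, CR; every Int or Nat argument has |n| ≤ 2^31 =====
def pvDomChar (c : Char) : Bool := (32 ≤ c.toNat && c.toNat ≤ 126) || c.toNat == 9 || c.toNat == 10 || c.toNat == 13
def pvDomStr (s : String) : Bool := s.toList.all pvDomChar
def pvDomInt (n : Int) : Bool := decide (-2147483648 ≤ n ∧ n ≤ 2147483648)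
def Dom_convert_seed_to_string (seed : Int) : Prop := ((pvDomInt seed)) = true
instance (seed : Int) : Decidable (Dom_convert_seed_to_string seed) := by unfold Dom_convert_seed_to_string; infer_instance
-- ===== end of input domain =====

-- B finds the highest power of 35 not exceeding n and peels digits most-significant-first,
-- instead of A's least-significant-first loop with front insertion (objective: alternative).

-- shared digit alphabet
def pvChars : List Char := "0123456789ABCDEFGHIJKLMNPQRSTUVWXYZ".toList

-- ===== PORT A =====
-- A's while-loop; fuel only makes it total (128 iterations cover any value below 35^128)
def pvLoopA : Nat → Int → List Char → List Char
  | 0, _, result => result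
  | fuel+1, leftover, result =>
    if leftover ≠ 0 then
      pvLoopA fuel (PySem.Int.floordiv leftover 35)
        (((PySem.List.pyGet? pvChars (PySem.Int.mod leftover 35)).getD ' ') :: result)
    else result

def convert_seed_to_string (seed : Int) : String :=
  let n : Int := if seed < 0 then seed + 2 ^ 64 else seed
  String.ofList (pvLoopA 128 n [])

-- ===== PORT B =====
-- first loop of B: grow p by factors of 35 while p * 35 ≤ n (fuel only makes it total)
def pvPowB : Nat → Int → Int → Int
  | 0, p, _ => p
  | fuel+1, p, n => if p * 35 ≤ n then pvPowB fuel (p * 35) n else p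

-- second loop of B: append the digit n // p, reduce n and p (fuel only makes it total)
def pvPeelB : Nat → Int → Int → String → String
  | 0, _, _, out => out
  | fuel+1, p, n, out =>
    if 0 < p then
      pvPeelB fuel (PySem.Int.floordiv p 35) (PySem.Int.mod n p)
        (out.push ((PySem.List.pyGet? pvChars (PySem.Int.floordiv n p)).getD ' '))
    else out

def convert_seed_to_string_alt (seed : Int) : String :=
  let n : Int := if seed < 0 then seed + 2 ^ 64 else seed
  if n = 0 then "" else pvPeelB 128 (pvPowB 128 1 n) n ""

-- ===== PRECONDITION & SPEC =====
def Spec_convert_seed_to_string (seed : Int) (out : String) : Prop := out = convert_seed_to_string_alt seed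
instance (seed : Int) (out : String) : Decidable (Spec_convert_seed_to_string seed out) := by unfold Spec_convert_seed_to_string; infer_instance

-- ===== CLAIM =====
def Claim_equal_convert_seed_to_string : Prop := ∀ (seed : Int), Dom_convert_seed_to_string seed → Spec_convert_seed_to_string seed (convert_seed_to_string seed)

-- ===== LEMMAS AND PROOFS =====

-- digit character for a Nat index
def pvDigitN (d : Nat) : Char := (pvChars[d]?).getD ' '

-- the canonical base-35 representation (least-significant digit computed first)
def pvCanRep (n : Nat) : List Char :=
  if h : n = 0 then [] else pvCanRep (n / 35) ++ [pvDigitN (n % 35)]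
termination_by n
decreasing_by exact Nat.div_lt_self (Nat.pos_of_ne_zero h) (by norm_num)

-- fixed-width (k+1 digits) base-35 representation, most-significant digit first
def pvPad : Nat → Nat → List Char
  | 0, m => [pvDigitN (m % 35)]
  | k+1, m => pvPad k (m / 35) ++ [pvDigitN (m % 35)]

theorem pvCast_fd (a : Nat) : PySem.Int.floordiv (a : Int) 35 = ((a / 35 : Nat) : Int) := by
  exact_mod_cast PySem.Int.floordiv_natCast a 35

theorem pvCast_mod (a : Nat) : PySem.Int.mod (a : Int) 35 = ((a % 35 : Nat) : Int) := by
  exact_mod_cast PySem.Int.mod_natCast a 35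

theorem pvLoopA_canRep (fuel : Nat) :
    ∀ (N : Nat) (acc : List Char), N < 35 ^ fuel →
      pvLoopA fuel (N : Int) acc = pvCanRep N ++ acc := by
  induction fuel with
  | zero => intro N acc h; simp at h; subst h; simp [pvLoopA, pvCanRep]
  | succ fuel ih =>
    intro N acc h
    by_cases h0 : N = 0
    · subst h0; simp [pvLoopA, pvCanRep]
    · rw [pvLoopA]
      simp only [Nat.cast_ne_zero, ne_eq, h0, not_false_eq_true, if_pos,
        pvCast_fd, pvCast_mod, PySem.List.pyGet?_natCast]
      rw [ih (N / 35) _ (Nat.div_lt_of_lt_mul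
        (by rw [show (35:Nat) * 35 ^ fuel = 35 ^ (fuel+1) by ring]; exact h))]
      conv_rhs => rw [pvCanRep]
      simp [h0, pvDigitN, List.append_assoc]

theorem pvPeelB_zero (fuel : Nat) (n : Int) (out : String) : pvPeelB fuel 0 n out = out := by
  cases fuel <;> simp [pvPeelB]

theorem pvPowB_spec (fuel : Nat) :
    ∀ (p N : Nat), 0 < p → p ≤ N → N < p * 35 ^ fuel →
      ∃ k, pvPowB fuel (p : Int) (N : Int) = ((p * 35 ^ k : Nat) : Int) ∧
        p * 35 ^ k ≤ N ∧ N < p * 35 ^ (k + 1) := by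
  induction fuel with
  | zero => intro p N hp hpN h; simp at h; omega
  | succ fuel ih =>
    intro p N hp hpN h
    rw [pvPowB]
    by_cases hc : p * 35 ≤ N
    · rw [if_pos (show ((p:Int) * 35 ≤ (N:Int)) by exact_mod_cast hc)]
      have hcast : ((p : Int) * 35) = ((p * 35 : Nat) : Int) := by push_cast; ring
      rw [hcast]
      have hfuel : N < p * 35 * 35 ^ fuel := by
        have : p * 35 * 35 ^ fuel = p * 35 ^ (fuel + 1) := by ring
        omega
      obtain ⟨k, hk, hle, hlt⟩ := ih (p * 35) N (by positivity) hc hfuel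
      refine ⟨k + 1, by rw [hk]; congr 1; ring, ?_, ?_⟩
      · have : p * 35 ^ (k + 1) = p * 35 * 35 ^ k := by ring
        omega
      · have : p * 35 * 35 ^ (k + 1) = p * 35 ^ (k + 1 + 1) := by ring
        omega
    · rw [if_neg (show ¬((p:Int) * 35 ≤ (N:Int)) by exact_mod_cast hc)]
      exact ⟨0, by norm_num, by simpa using hpN, by simpa using (by omega : N < p * 35)⟩

theorem pvPad_msb (k : Nat) :
    ∀ m : Nat, m < 35 ^ (k + 2) →
      pvPad (k + 1) m = pvDigitN (m / 35 ^ (k + 1)) :: pvPad k (m % 35 ^ (k + 1)) := by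
  induction k with
  | zero =>
    intro m hm
    have h1 : m / 35 < 35 := Nat.div_lt_of_lt_mul (by simpa [pow_succ] using hm)
    simp [pvPad, Nat.mod_eq_of_lt h1, pow_one, Nat.mod_mod_of_dvd m (dvd_refl 35)]
  | succ k ih =>
    intro m hm
    have hdiv : m / 35 < 35 ^ (k + 2) := Nat.div_lt_of_lt_mul
      (by rw [show (35:Nat) * 35 ^ (k+2) = 35 ^ (k+3) by ring]; exact hm)
    have e1 : m / 35 / 35 ^ (k + 1) = m / 35 ^ (k + 2) := by
      rw [Nat.div_div_eq_div_mul]; congr 1; ring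
    have e2 : m % 35 ^ (k + 2) / 35 = m / 35 % 35 ^ (k + 1) := by
      rw [show (35:Nat) ^ (k + 2) = 35 * 35 ^ (k + 1) by ring]
      exact Nat.mod_mul_right_div_self m 35 (35 ^ (k + 1))
    have e3 : m % 35 ^ (k + 2) % 35 = m % 35 :=
      Nat.mod_mod_of_dvd m (dvd_pow_self 35 (by omega))
    calc pvPad (k + 2) m = pvPad (k+1) (m / 35) ++ [pvDigitN (m % 35)] := rfl
      _ = (pvDigitN (m / 35 / 35 ^ (k+1)) :: pvPad k (m / 35 % 35 ^ (k+1))) ++ [pvDigitN (m % 35)] := by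
            rw [ih (m / 35) hdiv]
      _ = pvDigitN (m / 35 ^ (k + 2)) :: (pvPad k (m % 35 ^ (k+2) / 35) ++ [pvDigitN (m % 35 ^ (k+2) % 35)]) := by
            rw [e1, e2, e3]; rfl
      _ = pvDigitN (m / 35 ^ (k + 2)) :: pvPad (k + 1) (m % 35 ^ (k + 2)) := rfl

theorem pvCast_fdp (a b : Nat) : PySem.Int.floordiv (a : Int) (b : Int) = ((a / b : Nat) : Int) := by
  exact_mod_cast PySem.Int.floordiv_natCast a b

theorem pvCast_modp (a b : Nat) : PySem.Int.mod (a : Int) (b : Int) = ((a % b : Nat) : Int) := by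
  exact_mod_cast PySem.Int.mod_natCast a b

theorem pvPeelB_pad (k : Nat) :
    ∀ (j m : Nat) (out : String), m < 35 ^ (k + 1) →
      (pvPeelB (k + 1 + j) ((35 ^ k : Nat) : Int) (m : Int) out).toList
        = out.toList ++ pvPad k m := by
  induction k with
  | zero =>
    intro j m out hm
    have hm' : m < 35 := by simpa using hm
    rw [show 0 + 1 + j = j + 1 by omega, pvPeelB]
    rw [if_pos (show (0:Int) < ((35 ^ 0 : Nat) : Int) by norm_num)]
    have e1 : PySem.Int.floordiv ((35 ^ 0 : Nat) : Int) 35 = 0 := by decide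
    have e2 : PySem.Int.mod (m : Int) ((35 ^ 0 : Nat) : Int) = ((m % 1 : Nat) : Int) :=
      pvCast_modp m (35 ^ 0)
    have e3 : PySem.Int.floordiv (m : Int) ((35 ^ 0 : Nat) : Int) = ((m / 1 : Nat) : Int) :=
      pvCast_fdp m (35 ^ 0)
    rw [e1, e2, e3, pvPeelB_zero]
    simp [pvPad, pvDigitN, Nat.mod_eq_of_lt hm']
  | succ k ih =>
    intro j m out hm
    rw [show k + 1 + 1 + j = (k + 1 + j) + 1 by omega, pvPeelB]
    rw [if_pos (show (0:Int) < ((35 ^ (k + 1) : Nat) : Int) by positivity)]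
    have ep : PySem.Int.floordiv ((35 ^ (k + 1) : Nat) : Int) 35 = ((35 ^ k : Nat) : Int) := by
      rw [show (35:Int) = ((35:Nat):Int) by norm_num, pvCast_fdp]
      congr 1
      rw [pow_succ]
      exact Nat.mul_div_cancel _ (by norm_num)
    rw [ep, pvCast_modp m (35 ^ (k + 1)), pvCast_fdp m (35 ^ (k + 1))]
    rw [ih j (m % 35 ^ (k + 1)) _ (Nat.mod_lt m (by positivity))]
    rw [pvPad_msb k m hm, PySem.List.pyGet?_natCast]
    simp [pvDigitN]

theorem pvPad_eq_canRep (k : Nat) :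
    ∀ n : Nat, 35 ^ k ≤ n → n < 35 ^ (k + 1) → pvPad k n = pvCanRep n := by
  induction k with
  | zero =>
    intro n h1' h2'
    have h1 : 1 ≤ n := by simpa using h1'
    have h2 : n < 35 := by simpa using h2'
    rw [pvCanRep, dif_neg (show n ≠ 0 by omega), Nat.div_eq_of_lt h2,
      show pvCanRep 0 = [] from by simp [pvCanRep]]
    simp [pvPad, Nat.mod_eq_of_lt h2]
  | succ k ih =>
    intro n h1 h2
    have hpos : 0 < 35 ^ (k + 1) := by positivity
    have hne : n ≠ 0 := by omega
    rw [pvCanRep, dif_neg hne]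
    have hlo : 35 ^ k ≤ n / 35 := (Nat.le_div_iff_mul_le (by norm_num)).mpr
      (by have : 35 ^ k * 35 = 35 ^ (k+1) := by ring
          omega)
    have hhi : n / 35 < 35 ^ (k + 1) := Nat.div_lt_of_lt_mul
      (by rw [show (35:Nat) * 35 ^ (k+1) = 35 ^ (k+2) by ring]; exact h2)
    show pvPad k (n / 35) ++ [pvDigitN (n % 35)] = _
    rw [ih (n / 35) hlo hhi]

theorem pv_main (N : Nat) (hN : N < 35 ^ 128) :
    String.ofList (pvLoopA 128 (N : Int) []) =
      (if (N : Int) = 0 then "" else pvPeelB 128 (pvPowB 128 1 (N : Int)) (N : Int) "") := by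
  by_cases h0 : N = 0
  · subst h0
    rw [pvLoopA_canRep 128 0 [] hN]
    simp [show pvCanRep 0 = [] from by simp [pvCanRep]]
  · have hNpos : 1 ≤ N := Nat.pos_of_ne_zero h0
    obtain ⟨k, hk, hle, hlt⟩ := pvPowB_spec 128 1 N one_pos hNpos (by simpa using hN)
    have hk' : pvPowB 128 (1 : Int) (N : Int) = ((35 ^ k : Nat) : Int) := by simpa using hk
    have hle' : 35 ^ k ≤ N := by simpa using hle
    have hlt' : N < 35 ^ (k + 1) := by simpa using hlt
    have hklt : k < 128 := by
      by_contra hc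
      have : (35:Nat) ^ 128 ≤ 35 ^ k := Nat.pow_le_pow_right (by norm_num) (by omega)
      omega
    rw [if_neg (by exact_mod_cast h0), hk']
    have hpeel := pvPeelB_pad k (127 - k) N "" hlt'
    rw [show k + 1 + (127 - k) = 128 by omega] at hpeel
    apply String.toList_inj.mp
    rw [String.toList_ofList, pvLoopA_canRep 128 N [] hN, hpeel,
      pvPad_eq_canRep k N hle' hlt']
    simp

-- ===== VERDICT =====
theorem convert_seed_to_string_spec : Claim_equal_convert_seed_to_string := by
  intro seed hdom
  have hb : -2147483648 ≤ seed ∧ seed ≤ 2147483648 := by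
    simpa [Dom_convert_seed_to_string, pvDomInt] using hdom
  unfold Spec_convert_seed_to_string convert_seed_to_string convert_seed_to_string_alt
  show String.ofList (pvLoopA 128 (if seed < 0 then seed + 2 ^ 64 else seed) []) = _
  have h0 : 0 ≤ (if seed < 0 then seed + 2 ^ 64 else seed) := by split_ifs <;> omega
  have h64 : (if seed < 0 then seed + 2 ^ 64 else seed) < 2 ^ 65 := by split_ifs <;> omega
  obtain ⟨N, hNe⟩ : ∃ N : Nat, (if seed < 0 then seed + 2 ^ 64 else seed) = (N : Int) :=
    ⟨_, (Int.toNat_of_nonneg h0).symm⟩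
  rw [hNe] at h64 ⊢
  exact pv_main N (by
    calc N < 2 ^ 65 := by exact_mod_cast h64
      _ ≤ 2 ^ 128 := Nat.pow_le_pow_right (by norm_num) (by norm_num)
      _ ≤ 35 ^ 128 := Nat.pow_le_pow_left (by norm_num) 128)
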